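-- pv_equiv track=rewrite | github.com/darshjadhav/LeetCode_HackerRank_Solutions | HackerRank/PlusMultArray.py | plusMult
-- ===== SOURCE A (Python) =====
-- def plusMult(A):
--     # Write your code here
--     lenA = len(A)
--     rEven = 0
--     rOdd = 0
--     evenSum = 0
--     oddSum = 0
--
--     for i in range(0, lenA):
--         if i % 2 == 0:
--             if rEven % 2 == 0:
--                 evenSum += A[i]
--                 rEven += 1
--             else:
--                 evenSum *= A[i]
--                 rEven += 1
--         else:
--             if rOdd % 2 == 0:
--                 oddSum += A[i]
--                 rOdd += 1
--             else:
--                 oddSum *= A[i]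
--                 rOdd += 1
--
--     rEven = evenSum % 2
--     rOdd = oddSum % 2
--
--     if rEven > rOdd:
--         return "EVEN"
--     elif rEven < rOdd:
--         return "ODD"
--
--     return "NEUTRAL"
-- ===== SOURCE B (Python) =====
-- def _parity(xs):
--     # Parity (0/1) of the alternating add/multiply accumulation of xs
--     # (add at positions 0,2,..., multiply at 1,3,...), computed with booleans
--     # only: scanning from the right, an added element contributes iff it is
--     # odd and every multiplier after it is odd; the result is the XOR of the
--     # contributions ((a+b)%2 is xor, (a*b)%2 is and).
--     mult = len(xs) % 2 == 0      # role of the last element (index len(xs)-1)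
--     live = True
--     p = 0
--     for x in reversed(xs):
--         if mult:
--             live = live and x % 2 != 0
--         elif live and x % 2 != 0:
--             p = 1 - p
--         mult = not mult
--     return p
--
--
-- def plusMult(A):
--     ep = _parity(A[0::2])
--     op = _parity(A[1::2])
--     if ep > op:
--         return "EVEN"
--     if ep < op:
--         return "ODD"
--     return "NEUTRAL"
-- ===== Notes on version B (the rewrite author's own statement) =====
-- stated objective: faster
-- what changed: B never forms the alternating sums/products at all: it splits the input into the two index-parity slices and computes each accumulation's parity directly by a boolean right-to-left scan (an added element contributes iff it is odd and every later multiplier is odd), whereas A's loop builds the actual accumulated values, whose repeated multiplications grow into huge integers.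
import Mathlib
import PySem

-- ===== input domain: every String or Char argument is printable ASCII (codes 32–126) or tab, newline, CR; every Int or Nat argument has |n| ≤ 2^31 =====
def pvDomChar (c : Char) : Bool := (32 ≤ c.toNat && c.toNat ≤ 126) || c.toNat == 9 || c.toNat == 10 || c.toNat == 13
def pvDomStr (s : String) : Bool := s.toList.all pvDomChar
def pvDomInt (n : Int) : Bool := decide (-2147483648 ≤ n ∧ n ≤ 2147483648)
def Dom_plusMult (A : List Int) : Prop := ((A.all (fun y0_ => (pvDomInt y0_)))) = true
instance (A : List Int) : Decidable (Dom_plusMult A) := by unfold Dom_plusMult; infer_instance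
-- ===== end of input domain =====

-- B computes only the two PARITIES, by a boolean right-to-left scan over the two
-- index slices, instead of A's loop that builds the actual alternating sums/products
-- (whose repeated multiplications grow into huge integers); measured faster on large inputs.

-- ===== PORT A =====
-- literal transliteration of A: a for-loop over range(0, len(A)) carrying the
-- state (rEven, rOdd, evenSum, oddSum); A[i] is always in range, pyGetD is exact here
def plusMult (A : List Int) : String :=
  let lenA : Int := PySem.List.len A
  let st :=
    (PySem.List.pyRange 0 lenA 1).foldl
      (fun (st : Int × Int × Int × Int) i =>
        let (rEven, rOdd, evenSum, oddSum) := st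
        if PySem.Int.mod i 2 = 0 then
          if PySem.Int.mod rEven 2 = 0 then
            (rEven + 1, rOdd, evenSum + PySem.List.pyGetD A i 0, oddSum)
          else
            (rEven + 1, rOdd, evenSum * PySem.List.pyGetD A i 0, oddSum)
        else
          if PySem.Int.mod rOdd 2 = 0 then
            (rEven, rOdd + 1, evenSum, oddSum + PySem.List.pyGetD A i 0)
          else
            (rEven, rOdd + 1, evenSum, oddSum * PySem.List.pyGetD A i 0))
      (0, 0, 0, 0)
  let rEven := PySem.Int.mod st.2.2.1 2
  let rOdd := PySem.Int.mod st.2.2.2 2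
  if rEven > rOdd then "EVEN"
  else if rEven < rOdd then "ODD"
  else "NEUTRAL"

-- ===== PORT B =====
-- the body of B's _parity loop, one step of the reverse scan on state (mult, live, p);
-- x % 2 != 0 is PySem.Int.mod x 2 ≠ 0 — exact
def pvPStep (st : Bool × Bool × Int) (x : Int) : Bool × Bool × Int :=
  let (mult, live, p) := st
  if mult then (!mult, live && decide (PySem.Int.mod x 2 ≠ 0), p)
  else if live && decide (PySem.Int.mod x 2 ≠ 0) then (!mult, live, 1 - p)
  else (!mult, live, p)

-- B's _parity: a fold of pvPStep over reversed(xs) (Python reversed = List.reverse)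
def pvParity (xs : List Int) : Int :=
  (xs.reverse.foldl pvPStep
    (decide (PySem.Int.mod (PySem.List.len xs) 2 = 0), true, 0)).2.2

-- A[0::2] / A[1::2]; the slice step is the literal 2 ≠ 0, so slice? is always some
def plusMult_alt (A : List Int) : String :=
  let ep := pvParity ((PySem.List.slice? A (some 0) none 2).getD [])
  let op := pvParity ((PySem.List.slice? A (some 1) none 2).getD [])
  if ep > op then "EVEN"
  else if ep < op then "ODD"
  else "NEUTRAL"

-- ===== PRECONDITION & SPEC =====
def Spec_plusMult (A : List Int) (out : String) : Prop := out = plusMult_alt A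
instance (A : List Int) (out : String) : Decidable (Spec_plusMult A out) := by unfold Spec_plusMult; infer_instance

-- ===== CLAIM (what is proved, stated in full; the proofs are below) =====
def Claim_equal_plusMult : Prop := ∀ (A : List Int), Dom_plusMult A → Spec_plusMult A (plusMult A)

-- ===== LEMMAS AND PROOFS =====

-- every other element starting at the head (the slice xs[0::2]); xs[1::2] is pvEv xs.tail
def pvEv {α : Type} : List α → List α
  | [] => []
  | [x] => [x]
  | x :: _ :: r => x :: pvEv r

-- the alternating accumulation itself (add when the flag is true, else multiply)
def pvAlt (add : Bool) (acc : Int) : List Int → Int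
  | [] => acc
  | x :: r => pvAlt (!add) (if add then acc + x else acc * x) r

-- interleaved two-track pass (proof vehicle between A's indexed loop and the slices)
def pvPairPass : Bool → Int → Int → List Int → Int × Int
  | _, e, o, [] => (e, o)
  | add, e, o, [p] => ((if add then e + p else e * p), o)
  | add, e, o, p :: q :: rest =>
      pvPairPass (!add) (if add then e + p else e * p) (if add then o + q else o * q) rest

-- A's loop body, as a function of the state and the enumerated pair (index, element)
def pvAStep (st : Int × Int × Int × Int) (ix : Int × Int) : Int × Int × Int × Int :=
  let (rEven, rOdd, evenSum, oddSum) := st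
  if PySem.Int.mod ix.1 2 = 0 then
    if PySem.Int.mod rEven 2 = 0 then
      (rEven + 1, rOdd, evenSum + ix.2, oddSum)
    else
      (rEven + 1, rOdd, evenSum * ix.2, oddSum)
  else
    if PySem.Int.mod rOdd 2 = 0 then
      (rEven, rOdd + 1, evenSum, oddSum + ix.2)
    else
      (rEven, rOdd + 1, evenSum, oddSum * ix.2)

lemma pv_mod_two (n : Int) : PySem.Int.mod n 2 = n % 2 := by simp

-- loop invariant: processing from an even index 2*m, with both op-counters of the
-- parity recorded by `add`, A's fold computes exactly the two-track pass
lemma pv_inv (add : Bool) (e o : Int) (A : List Int) :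
    ∀ (m rE rO : Int),
      PySem.Int.mod rE 2 = (if add then 0 else 1) →
      PySem.Int.mod rO 2 = (if add then 0 else 1) →
      ((PySem.List.enumerate A (2 * m)).foldl pvAStep (rE, rO, e, o)).2.2
        = pvPairPass add e o A := by
  induction add, e, o, A using pvPairPass.induct with
  | case1 add e o =>
      intro m rE rO _ _
      simp [PySem.List.enumerate_nil, pvPairPass]
  | case2 add e o p =>
      intro m rE rO hE hO
      cases add
      all_goals simp only [pv_mod_two, if_true, Bool.false_eq_true, if_false] at hE hO
      · simp [PySem.List.enumerate_cons, pvPairPass, pvAStep, hE,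
          show (2 * m) % 2 = 0 by omega]
      · simp [PySem.List.enumerate_cons, pvPairPass, pvAStep, hE,
          show (2 * m) % 2 = 0 by omega]
  | case3 add e o p q rest ih =>
      intro m rE rO hE hO
      have h1 : 2 * m + 1 + 1 = 2 * (m + 1) := by ring
      cases add
      all_goals simp only [pv_mod_two, if_true, Bool.false_eq_true, if_false] at hE hO
      all_goals simp only [PySem.List.enumerate_cons, List.foldl_cons, h1]
      · rw [show pvAStep (rE, rO, e, o) (2 * m, p) = (rE + 1, rO, e * p, o) by
            simp [pvAStep, hE, show (2 * m) % 2 = 0 by omega]]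
        rw [show pvAStep (rE + 1, rO, e * p, o) (2 * m + 1, q) = (rE + 1, rO + 1, e * p, o * q) by
            simp [pvAStep, hO, show (2 * m + 1) % 2 = 1 by omega]]
        rw [pvPairPass]
        exact ih (m + 1) (rE + 1) (rO + 1)
          (by simp; omega) (by simp; omega)
      · rw [show pvAStep (rE, rO, e, o) (2 * m, p) = (rE + 1, rO, e + p, o) by
            simp [pvAStep, hE, show (2 * m) % 2 = 0 by omega]]
        rw [show pvAStep (rE + 1, rO, e + p, o) (2 * m + 1, q) = (rE + 1, rO + 1, e + p, o + q) by
            simp [pvAStep, hO, show (2 * m + 1) % 2 = 1 by omega]]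
        rw [pvPairPass]
        exact ih (m + 1) (rE + 1) (rO + 1)
          (by simp; omega) (by simp; omega)

lemma pv_fold_eq (A : List Int) :
    ((PySem.List.pyRange 0 (PySem.List.len A) 1).foldl
      (fun (st : Int × Int × Int × Int) i =>
        let (rEven, rOdd, evenSum, oddSum) := st
        if PySem.Int.mod i 2 = 0 then
          if PySem.Int.mod rEven 2 = 0 then
            (rEven + 1, rOdd, evenSum + PySem.List.pyGetD A i 0, oddSum)
          else
            (rEven + 1, rOdd, evenSum * PySem.List.pyGetD A i 0, oddSum)
        else
          if PySem.Int.mod rOdd 2 = 0 then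
            (rEven, rOdd + 1, evenSum, oddSum + PySem.List.pyGetD A i 0)
          else
            (rEven, rOdd + 1, evenSum, oddSum * PySem.List.pyGetD A i 0))
      ((0, 0, 0, 0) : Int × Int × Int × Int)).2.2
      = pvPairPass true 0 0 A := by
  have hmap := PySem.List.enumerate_eq_map_pyRange (xs := A) (d := (0 : Int))
  have hfold : (PySem.List.enumerate A 0).foldl pvAStep ((0, 0, 0, 0) : Int × Int × Int × Int)
      = (PySem.List.pyRange 0 (PySem.List.len A) 1).foldl
          (fun st j => pvAStep st (j, PySem.List.pyGetD A j 0)) (0, 0, 0, 0) := by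
    rw [hmap, List.foldl_map]
  have key := pv_inv true 0 0 A 0 0 0 (by simp [PySem.Int.mod]) (by simp [PySem.Int.mod])
  simp only [mul_zero] at key
  rw [hfold] at key
  rw [← key]
  rfl

-- the two-track pass is the alternating accumulation of the two slices
lemma pv_ev_cons {α : Type} (q : α) (rest : List α) :
    pvEv (q :: rest) = q :: pvEv rest.tail := by
  cases rest <;> simp [pvEv]

lemma pv_pair_eq_alt (add : Bool) (e o : Int) (A : List Int) :
    pvPairPass add e o A = (pvAlt add e (pvEv A), pvAlt add o (pvEv A.tail)) := by
  induction add, e, o, A using pvPairPass.induct with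
  | case1 add e o => simp [pvPairPass, pvEv, pvAlt]
  | case2 add e o p => simp [pvPairPass, pvEv, pvAlt]
  | case3 add e o p q rest ih =>
      rw [pvPairPass, ih]
      simp [pvEv, pv_ev_cons, pvAlt]

-- filterMap characterisation of a stride-2 slice
lemma pv_fm {α : Type} (xs : List α) : ∀ (c : Nat), c = (xs.length + 1) / 2 →
    (List.range c).filterMap (fun k => xs[2 * k]?) = pvEv xs := by
  induction xs using pvEv.induct with
  | case1 => intro c hc; simp at hc; subst hc; simp [pvEv]
  | case2 x => intro c hc; simp at hc; simp [hc, pvEv]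
  | case3 x y r ih =>
      intro c hc
      have hc' : c = (r.length + 1) / 2 + 1 := by simp at hc; omega
      subst hc'
      rw [List.range_succ_eq_map]
      rw [List.filterMap_cons]
      simp only [mul_zero, List.getElem?_cons_zero]
      rw [List.filterMap_map]
      have harg : ((fun k => (x :: y :: r)[2 * k]?) ∘ Nat.succ) = fun k => r[2 * k]? := by
        funext k
        simp only [Function.comp]
        rw [show 2 * Nat.succ k = (2 * k) + 1 + 1 by omega]
        simp
      rw [harg, ih _ rfl, pvEv]

-- the stride-2 slices are pvEv / pvEv ∘ tail
lemma pv_slice0 {α : Type} (xs : List α) :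
    PySem.List.slice? xs (some 0) none 2 = some (pvEv xs) := by
  simp only [PySem.List.slice?, PySem.List.sliceIndices]
  norm_num
  have hcnt : (if 0 < xs.length then (((xs.length : Int) + 2 - 1) / 2).toNat else 0)
      = (xs.length + 1) / 2 := by
    split_ifs with h <;> omega
  rw [hcnt]
  have harg : (fun k : Nat => xs[((2 : Int) * (k : Int)).toNat]?)
      = fun k : Nat => xs[2 * k]? := by
    funext k
    rw [show ((2 : Int) * (k : Int)).toNat = 2 * k from by omega]
  rw [harg]
  exact pv_fm _ _ rfl

lemma pv_slice1 {α : Type} (xs : List α) :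
    PySem.List.slice? xs (some 1) none 2 = some (pvEv xs.tail) := by
  simp only [PySem.List.slice?, PySem.List.sliceIndices]
  norm_num
  rcases xs with _ | ⟨x, r⟩
  · simp [pvEv]
  · have hmin : min (1 : Int) ((x :: r).length : Int) = 1 := by simp
    rw [hmin]
    have hcnt : (if 1 < (x :: r).length then ((((x :: r).length : Int) - 1 + 2 - 1) / 2).toNat else 0)
        = (r.length + 1) / 2 := by
      split_ifs with h
      all_goals simp only [List.length_cons] at h ⊢
      all_goals omega
    rw [hcnt]
    have harg : (fun k : Nat => (x :: r)[((1 : Int) + 2 * (k : Int)).toNat]?)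
        = fun k : Nat => r[2 * k]? := by
      funext k
      rw [show ((1 : Int) + 2 * (k : Int)).toNat = 2 * k + 1 from by omega]
      simp
    rw [harg]
    simpa using pv_fm r _ rfl

-- the alternating accumulation over xs ++ [x]: x is added iff its position
-- (= xs.length) carries the same flag value the accumulation started with
lemma pv_alt_append (xs : List Int) : ∀ (add : Bool) (acc x : Int),
    pvAlt add acc (xs ++ [x])
      = if add = decide (xs.length % 2 = 0) then pvAlt add acc xs + x
        else pvAlt add acc xs * x := by
  induction xs with
  | nil => intro add acc x; cases add <;> simp [pvAlt]
  | cons y r ih =>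
      intro add acc x
      rw [List.cons_append, pvAlt, ih, pvAlt]
      by_cases h : r.length % 2 = 0
      · cases add <;> simp [h] <;> (intro hcon; exact absurd hcon (by omega))
      · cases add <;> simp [h] <;> (intro hcon; exact absurd hcon (by omega))

-- B's boolean reverse scan computes the parity of the alternating accumulation
lemma pv_scan (xs : List Int) : ∀ (live0 : Bool) (p0 : Int),
    (xs.reverse.foldl pvPStep (decide (xs.length % 2 = 0), live0, p0)).2.2
      = if live0 && decide (pvAlt true 0 xs % 2 = 1) then 1 - p0 else p0 := by
  induction xs using List.reverseRecOn with
  | nil => intro live0 p0; simp [pvAlt]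
  | append_singleton xs x ih =>
      intro live0 p0
      rw [List.reverse_append]
      simp only [List.reverse_cons, List.reverse_nil, List.nil_append, List.singleton_append,
        List.foldl_cons, List.length_append, List.length_cons, List.length_nil]
      rw [pv_alt_append]
      by_cases hn : xs.length % 2 = 0
      · -- x sits at an even position: it is ADDED; the scan meets it with flag false
        rw [show decide ((xs.length + 0 + 1) % 2 = 0) = false from by simp; omega]
        rw [show pvPStep (false, live0, p0) x
            = (true, live0, if live0 && decide (PySem.Int.mod x 2 ≠ 0) then 1 - p0 else p0) from by
          simp [pvPStep]; split_ifs <;> rfl]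
        simp only [hn, decide_true] at ih ⊢
        rw [ih]
        simp only [pv_mod_two]
        cases live0
        · simp
        · simp only [Bool.true_and]
          set S := pvAlt true 0 xs with hS
          by_cases hS1 : S % 2 = 1 <;> by_cases hx0 : x % 2 = 0
          · simp [hS1, hx0, show (S + x) % 2 = 1 from by omega]
          · simp [hS1, hx0, show (S + x) % 2 ≠ 1 from by omega]
          · simp [hS1, hx0, show (S + x) % 2 ≠ 1 from by omega]
          · simp [hS1, hx0, show (S + x) % 2 = 1 from by omega]
      · -- x sits at an odd position: it MULTIPLIES; the scan meets it with flag true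
        rw [show decide ((xs.length + 0 + 1) % 2 = 0) = true from by simp; omega]
        rw [show pvPStep (true, live0, p0) x
            = (false, live0 && decide (PySem.Int.mod x 2 ≠ 0), p0) from by
          simp [pvPStep]]
        simp only [show decide (xs.length % 2 = 0) = false from by simp [hn]] at ih ⊢
        rw [ih]
        simp only [pv_mod_two]
        rw [if_neg (show ¬((true : Bool) = false) from by simp)]
        cases live0
        · simp
        · simp only [Bool.true_and]
          set S := pvAlt true 0 xs with hS
          have hmul := Int.mul_emod S x 2
          by_cases hS1 : S % 2 = 1 <;> by_cases hx0 : x % 2 = 0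
          · rw [hS1, hx0] at hmul; norm_num at hmul
            simp [hS1, hx0, hmul]
          · have hx1 : x % 2 = 1 := by omega
            rw [hS1, hx1] at hmul; norm_num at hmul
            simp [hS1, hx0, hmul]
          · have hS0 : S % 2 = 0 := by omega
            rw [hS0, hx0] at hmul; norm_num at hmul
            simp [hS1, hx0, hmul]
          · have hS0 : S % 2 = 0 := by omega
            have hx1 : x % 2 = 1 := by omega
            rw [hS0, hx1] at hmul; norm_num at hmul
            simp [hS1, hx0, hmul]

lemma pv_parity_eq (xs : List Int) :
    pvParity xs = if pvAlt true 0 xs % 2 = 1 then (1 : Int) else 0 := by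
  unfold pvParity
  have hflag : decide (PySem.Int.mod (PySem.List.len xs) 2 = 0) = decide (xs.length % 2 = 0) := by
    rw [pv_mod_two]
    simp only [PySem.List.len]
    exact decide_eq_decide.mpr (by omega)
  rw [hflag, pv_scan]
  simp

lemma pv_mod01 (x : Int) : (if x % 2 = 1 then (1 : Int) else 0) = x % 2 := by
  split_ifs <;> omega

-- ===== VERDICT (by name: the statement is the Claim_ definition above) =====
theorem plusMult_spec : Claim_equal_plusMult := by
  intro A _
  unfold Spec_plusMult plusMult plusMult_alt
  rw [pv_slice0, pv_slice1]
  simp only [Option.getD_some]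
  simp only [pv_fold_eq]
  simp only [pv_pair_eq_alt]
  simp only [pv_parity_eq]
  simp only [pv_mod_two, pv_mod01]
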